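-- pv_equiv track=rewrite | github.com/TwinConsult-AS/akn-profiler | server/akn_profiler/server.py | _section_end
-- ===== SOURCE A (Python) =====
-- def _section_end(lines: list[str], start: int, indent: int) -> int:
--     """Return the last content line belonging to the block starting at *start*."""
--     last = start
--     for i in range(start + 1, len(lines)):
--         s = lines[i].strip()
--         if not s:
--             continue
--         if (len(lines[i]) - len(s)) <= indent:
--             break
--         last = i
--     return last
-- ===== SOURCE B (Python) =====
-- def _section_end(lines: list[str], start: int, indent: int) -> int:
--     """Two-phase version: locate the block boundary first, then take the
--     last non-blank line before it (falling back to start)."""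
--     n = len(lines)
--     end = n
--     for i in range(start + 1, n):
--         s = lines[i].strip()
--         if s and len(lines[i]) - len(s) <= indent:
--             end = i
--             break
--     for i in range(end - 1, start, -1):
--         if lines[i].strip():
--             return i
--     return start
-- ===== Notes on version B (the rewrite author's own statement) =====
-- stated objective: alternative
-- what changed: Replaces the single forward loop carrying a running 'last content line' accumulator by two phases: a forward scan that only finds the block boundary (first non-blank line dedented to <= indent), then a backward scan from that boundary returning the first non-blank line, falling back to start.
import Mathlib
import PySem

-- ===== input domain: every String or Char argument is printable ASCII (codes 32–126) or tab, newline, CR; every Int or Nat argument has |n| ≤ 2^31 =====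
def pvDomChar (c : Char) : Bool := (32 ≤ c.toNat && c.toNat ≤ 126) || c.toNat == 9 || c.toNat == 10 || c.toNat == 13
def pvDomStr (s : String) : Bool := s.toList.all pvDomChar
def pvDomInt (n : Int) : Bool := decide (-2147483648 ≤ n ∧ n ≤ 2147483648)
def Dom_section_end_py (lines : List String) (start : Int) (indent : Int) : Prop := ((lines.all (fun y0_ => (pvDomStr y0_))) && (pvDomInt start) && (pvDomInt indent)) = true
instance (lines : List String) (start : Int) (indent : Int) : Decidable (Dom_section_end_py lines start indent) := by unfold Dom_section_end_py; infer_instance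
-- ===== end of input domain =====

-- B splits A's single accumulator loop into a boundary-finding forward scan plus a
-- backward scan for the last non-blank line before the boundary (alternative decomposition).


-- ===== PORT A =====
-- line i is blank after stripping
def pvBlank (lines : List String) (i : Int) : Bool :=
  PySem.Str.len (PySem.Str.strip (PySem.List.pyGetD lines i "")) == 0

-- line i is non-blank and dedented to ≤ indent (A's break condition)
def pvStop (lines : List String) (indent : Int) (i : Int) : Bool :=
  !pvBlank lines i &&
    (PySem.Str.len (PySem.List.pyGetD lines i "") -
     PySem.Str.len (PySem.Str.strip (PySem.List.pyGetD lines i "")) ≤ indent)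

-- A's loop: blank → continue; non-blank dedented → break; else last := i
def pvALoop (lines : List String) (indent : Int) (last : Int) : List Int → Int
  | [] => last
  | i :: rest =>
    if pvBlank lines i then pvALoop lines indent last rest
    else if PySem.Str.len (PySem.List.pyGetD lines i "") -
            PySem.Str.len (PySem.Str.strip (PySem.List.pyGetD lines i "")) ≤ indent then last
    else pvALoop lines indent i rest

def section_end_py (lines : List String) (start : Int) (indent : Int) : Int :=
  pvALoop lines indent start (PySem.List.pyRange (start + 1) (PySem.List.len lines) 1)

-- ===== PORT B =====
-- B phase 1: first index whose line is non-blank and dedented to ≤ indent; default n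
def pvFindEnd (lines : List String) (indent : Int) (n : Int) : List Int → Int
  | [] => n
  | i :: rest => if pvStop lines indent i then i else pvFindEnd lines indent n rest

-- B phase 2: first non-blank index scanning the (descending) list; default start
def pvFindBack (lines : List String) (start : Int) : List Int → Int
  | [] => start
  | i :: rest => if pvBlank lines i then pvFindBack lines start rest else i

def section_end_py_alt (lines : List String) (start : Int) (indent : Int) : Int :=
  let n := PySem.List.len lines
  let e := pvFindEnd lines indent n (PySem.List.pyRange (start + 1) n 1)
  pvFindBack lines start (PySem.List.pyRange (e - 1) start (-1))

-- ===== PRECONDITION & SPEC =====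
-- Pre_ excludes exactly the inputs on which Python A raises IndexError:
-- a nonempty index range starting below -len(lines).
def Pre_section_end_py (lines : List String) (start : Int) (indent : Int) : Prop :=
  -(lines.length : Int) ≤ start + 1 ∨ (lines.length : Int) ≤ start + 1
instance (lines : List String) (start : Int) (indent : Int) : Decidable (Pre_section_end_py lines start indent) := by unfold Pre_section_end_py; infer_instance
def pvWitness_section_end_py : List String × Int × Int := (["a", "  b", "", "  c", "d"], 0, 0)

def Spec_section_end_py (lines : List String) (start : Int) (indent : Int) (out : Int) : Prop := out = section_end_py_alt lines start indent
instance (lines : List String) (start : Int) (indent : Int) (out : Int) : Decidable (Spec_section_end_py lines start indent out) := by unfold Spec_section_end_py; infer_instance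

-- ===== CLAIM (what is proved, stated in full; the proofs are below) =====
def Claim_equal_section_end_py : Prop := ∀ (lines : List String) (start : Int) (indent : Int), Dom_section_end_py lines start indent → Pre_section_end_py lines start indent → Spec_section_end_py lines start indent (section_end_py lines start indent)

-- ===== LEMMAS AND PROOFS =====

-- the joint "last non-blank index in l, default last" both programs compute
def pvLastNB (lines : List String) (last : Int) : List Int → Int
  | [] => last
  | i :: rest => pvLastNB lines (if pvBlank lines i then last else i) rest

theorem pvStop_false_elim (lines : List String) (indent i : Int)
    (h : pvStop lines indent i = false) (hb : pvBlank lines i = false) :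
    ¬ (PySem.Str.len (PySem.List.pyGetD lines i "") -
       PySem.Str.len (PySem.Str.strip (PySem.List.pyGetD lines i "")) ≤ indent) := by
  intro hle
  rw [pvStop, hb] at h
  simp at h
  simp [PySem.Str.len_eq] at hle h
  omega

theorem pvStop_true_blank (lines : List String) (indent i : Int)
    (h : pvStop lines indent i = true) : pvBlank lines i = false := by
  rw [pvStop] at h
  cases hb : pvBlank lines i with
  | false => rfl
  | true => rw [hb] at h; simp at h

theorem pvStop_true_ded (lines : List String) (indent i : Int)
    (h : pvStop lines indent i = true) :
    PySem.Str.len (PySem.List.pyGetD lines i "") -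
      PySem.Str.len (PySem.Str.strip (PySem.List.pyGetD lines i "")) ≤ indent := by
  rw [pvStop, pvStop_true_blank lines indent i h] at h
  simpa using h

theorem pvALoop_no_stop (lines : List String) (indent : Int) :
    ∀ (l : List Int) (last : Int), (∀ i ∈ l, pvStop lines indent i = false) →
      pvALoop lines indent last l = pvLastNB lines last l := by
  intro l
  induction l with
  | nil => intro last _; rfl
  | cons i rest ih =>
    intro last h
    have hi := h i (List.mem_cons_self ..)
    have hrest : ∀ j ∈ rest, pvStop lines indent j = false :=
      fun j hj => h j (List.mem_cons_of_mem _ hj)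
    rw [pvALoop, pvLastNB]
    cases hb : pvBlank lines i with
    | true => rw [if_pos rfl, if_pos rfl, ih _ hrest]
    | false =>
      rw [if_neg (by simp), if_neg (pvStop_false_elim lines indent i hi hb),
        if_neg (by simp), ih _ hrest]

theorem pvALoop_stop (lines : List String) (indent : Int) :
    ∀ (l₁ : List Int) (j : Int) (l₂ : List Int) (last : Int),
      (∀ i ∈ l₁, pvStop lines indent i = false) → pvStop lines indent j = true →
      pvALoop lines indent last (l₁ ++ j :: l₂) = pvLastNB lines last l₁ := by
  intro l₁
  induction l₁ with
  | nil =>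
    intro j l₂ last _ hj
    rw [List.nil_append, pvALoop, pvStop_true_blank lines indent j hj]
    rw [if_neg (by simp), if_pos (pvStop_true_ded lines indent j hj)]
    rfl
  | cons i rest ih =>
    intro j l₂ last h hj
    have hi := h i (List.mem_cons_self ..)
    have hrest : ∀ k ∈ rest, pvStop lines indent k = false :=
      fun k hk => h k (List.mem_cons_of_mem _ hk)
    rw [List.cons_append, pvALoop, pvLastNB]
    cases hb : pvBlank lines i with
    | true => rw [if_pos rfl, if_pos rfl, ih _ _ _ hrest hj]
    | false =>
      rw [if_neg (by simp), if_neg (pvStop_false_elim lines indent i hi hb),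
        if_neg (by simp), ih _ _ _ hrest hj]

theorem pvFindBack_append_singleton (lines : List String) (start : Int)
    (u : List Int) (x : Int) :
    pvFindBack lines start (u ++ [x]) =
      pvFindBack lines (if pvBlank lines x then start else x) u := by
  induction u with
  | nil => by_cases hb : pvBlank lines x <;> simp [pvFindBack, hb]
  | cons y u' ih =>
    by_cases hy : pvBlank lines y <;> simp [pvFindBack, hy, ih]

theorem pvFindBack_reverse (lines : List String) :
    ∀ (l : List Int) (last : Int),
      pvFindBack lines last l.reverse = pvLastNB lines last l := by
  intro l
  induction l with
  | nil => intro last; rfl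
  | cons x xs ih =>
    intro last
    have : (x :: xs).reverse = xs.reverse ++ [x] := by simp
    rw [this, pvFindBack_append_singleton, ih, pvLastNB]

-- characterisation of pvFindEnd on an arbitrary index list
theorem pvFindEnd_cases (lines : List String) (indent : Int) (n : Int) :
    ∀ (l : List Int),
      (pvFindEnd lines indent n l = n ∧ ∀ i ∈ l, pvStop lines indent i = false) ∨
      (∃ l₁ j l₂, l = l₁ ++ j :: l₂ ∧ pvFindEnd lines indent n l = j ∧
        pvStop lines indent j = true ∧ ∀ i ∈ l₁, pvStop lines indent i = false) := by
  intro l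
  induction l with
  | nil => left; simp [pvFindEnd]
  | cons i rest ih =>
    by_cases hi : pvStop lines indent i
    · right; exact ⟨[], i, rest, by simp, by simp [pvFindEnd, hi], hi, by simp⟩
    · rcases ih with ⟨he, hall⟩ | ⟨l₁, j, l₂, heq, he, hj, hall⟩
      · left
        refine ⟨by simp [pvFindEnd, hi, he], ?_⟩
        intro k hk
        rcases List.mem_cons.mp hk with h | h
        · subst h; simpa using hi
        · exact hall k h
      · right
        refine ⟨i :: l₁, j, l₂, by simp [heq], by simp [pvFindEnd, hi, he], hj, ?_⟩
        intro k hk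
        rcases List.mem_cons.mp hk with h | h
        · subst h; simpa using hi
        · exact hall k h

-- a cons-decomposition of a unit-step range determines its prefix
theorem pvRange_prefix (j n : Int) :
    ∀ (l₁ : List Int) (a : Int) (l₂ : List Int),
      PySem.List.pyRange a n 1 = l₁ ++ j :: l₂ → l₁ = PySem.List.pyRange a j 1 := by
  intro l₁
  induction l₁ with
  | nil =>
    intro a l₂ h
    have hne : PySem.List.pyRange a n 1 ≠ [] := by simp [h]
    have han : a < n := by
      by_contra hc
      exact hne (PySem.List.pyRange_one_eq_nil (by omega))
    rw [PySem.List.pyRange_one_cons han] at h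
    have : a = j := by simpa using ((List.cons.injEq ..).mp h).1
    subst this
    simp [PySem.List.pyRange_one_eq_nil (le_refl a)]
  | cons x l₁' ih =>
    intro a l₂ h
    have hne : PySem.List.pyRange a n 1 ≠ [] := by simp [h]
    have han : a < n := by
      by_contra hc
      exact hne (PySem.List.pyRange_one_eq_nil (by omega))
    rw [PySem.List.pyRange_one_cons han] at h
    have hinj := (List.cons.injEq ..).mp h
    have hx : x = a := hinj.1.symm
    have htail : PySem.List.pyRange (a + 1) n 1 = l₁' ++ j :: l₂ := hinj.2
    have hmem : j ∈ PySem.List.pyRange (a + 1) n 1 := by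
      rw [htail]; simp
    have haj : a + 1 ≤ j := ((PySem.List.mem_pyRange_one ..).mp hmem).1
    rw [PySem.List.pyRange_one_cons (by omega : a < j), hx, ih _ _ htail]

theorem pvReverse_range (a e : Int) :
    PySem.List.pyRange (e - 1) a (-1) = (PySem.List.pyRange (a + 1) e 1).reverse := by
  have := PySem.List.pyRange_neg_one_eq_reverse (e - 1) a
  simpa using this

-- ===== VERDICT (by name: the statement is the Claim_ definition above) =====
theorem section_end_py_spec : Claim_equal_section_end_py := by
  intro lines start indent _ _
  unfold Spec_section_end_py section_end_py section_end_py_alt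
  show pvALoop lines indent start (PySem.List.pyRange (start + 1) (PySem.List.len lines) 1) =
    pvFindBack lines start (PySem.List.pyRange
      (pvFindEnd lines indent (PySem.List.len lines)
        (PySem.List.pyRange (start + 1) (PySem.List.len lines) 1) - 1) start (-1))
  rcases pvFindEnd_cases lines indent (PySem.List.len lines)
      (PySem.List.pyRange (start + 1) (PySem.List.len lines) 1) with
    ⟨he, hall⟩ | ⟨l₁, j, l₂, heq, he, hj, hall⟩
  · rw [pvALoop_no_stop lines indent _ start hall, he, pvReverse_range,
      pvFindBack_reverse]
  · rw [he, pvReverse_range, pvFindBack_reverse, heq,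
      pvALoop_stop lines indent l₁ j l₂ start hall hj,
      pvRange_prefix j (PySem.List.len lines) l₁ (start + 1) l₂ heq]
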